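-- pv_equiv track=rewrite | github.com/LuciaPalumbi/TC-MCE-with-subtask-awareness | mce_irl_torch.py | preprocess_trajectories
-- ===== SOURCE A (Python) =====
-- def preprocess_trajectories(trajectories):
--     grouped_trajectories = {0: [], 1: [], 2: []}
--     for trajectory in trajectories.values():
--         current_subtask = None
--         current_segment = []
--         for state, action in trajectory:
--             subtask = int(state[-2])  # Assuming subtask is the second-to-last element
--             if subtask != current_subtask:
--                 if current_segment:
--                     grouped_trajectories[current_subtask].append(current_segment)
--                 current_subtask = subtask
--                 current_segment = []
--             current_segment.append((state, action))
--         if current_segment: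
--             grouped_trajectories[current_subtask].append(current_segment)
--     return grouped_trajectories
-- ===== SOURCE B (Python) =====
-- def preprocess_trajectories(trajectories):
--     grouped_trajectories = {0: [], 1: [], 2: []}
--     for trajectory in trajectories.values():
--         trajectory = list(trajectory)
--         n = len(trajectory)
--         i = 0
--         while i < n:
--             k = int(trajectory[i][0][-2])
--             j = i + 1
--             while j < n and int(trajectory[j][0][-2]) == k:
--                 j += 1
--             grouped_trajectories[k].append([(state, action) for state, action in trajectory[i:j]])
--             i = j
--     return grouped_trajectories
-- ===== Notes on version B (the rewrite author's own statement) =====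
-- stated objective: alternative
-- what changed: Replaces A's streaming state machine (current_subtask/current_segment accumulators flushed on key change and at the end) with a two-pointer run scanner that finds each maximal run [i:j) of equal subtask keys and appends the slice directly.
import Mathlib
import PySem

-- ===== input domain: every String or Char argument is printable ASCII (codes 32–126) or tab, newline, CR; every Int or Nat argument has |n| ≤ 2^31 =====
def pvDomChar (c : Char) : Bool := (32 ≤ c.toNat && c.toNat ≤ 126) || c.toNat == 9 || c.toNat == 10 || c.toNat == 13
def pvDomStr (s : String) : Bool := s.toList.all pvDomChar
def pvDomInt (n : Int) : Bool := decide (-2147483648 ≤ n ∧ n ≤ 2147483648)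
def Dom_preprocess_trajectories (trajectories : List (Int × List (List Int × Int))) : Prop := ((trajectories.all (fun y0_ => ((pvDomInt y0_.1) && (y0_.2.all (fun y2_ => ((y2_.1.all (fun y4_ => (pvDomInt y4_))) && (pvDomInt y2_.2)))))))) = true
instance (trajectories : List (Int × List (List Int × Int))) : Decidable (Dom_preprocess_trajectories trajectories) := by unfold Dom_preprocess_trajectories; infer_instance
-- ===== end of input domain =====

-- B replaces A's streaming current_subtask/current_segment state machine with a
-- two-pointer scan over maximal runs of equal subtask keys (alternative decomposition,
-- same cost). Return-value equivalence only; neither version mutates its argument.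

-- subtask = int(state[-2]); total via default 0 (Pre_ guarantees the index is in range)
def pvKey (sa : List Int × Int) : Int := PySem.List.pyGetD sa.1 (-2) 0

-- grouped_trajectories[k].append(seg) on the assoc list (key always present under Pre_)
def pvAppend (d : List (Int × List (List (List Int × Int)))) (k : Int)
    (seg : List (List Int × Int)) : List (Int × List (List (List Int × Int))) :=
  d.map (fun p => if p.1 = k then (p.1, p.2 ++ [seg]) else p)

-- ===== PORT A =====
-- the body of the inner 'for state, action in trajectory' loop
def pvStepA (st : List (Int × List (List (List Int × Int))) × Option Int × List (List Int × Int))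
    (sa : List Int × Int) :
    List (Int × List (List (List Int × Int))) × Option Int × List (List Int × Int) :=
  if some (pvKey sa) ≠ st.2.1 then
    let d := if st.2.2 = [] then st.1 else pvAppend st.1 (st.2.1.getD 0) st.2.2
    (d, some (pvKey sa), [sa])
  else
    (st.1, st.2.1, st.2.2 ++ [sa])

-- one trajectory: run the loop from (grouped, None, []) then flush the last segment
def pvTrajA (d : List (Int × List (List (List Int × Int)))) (traj : List (List Int × Int)) :
    List (Int × List (List (List Int × Int))) :=
  let s := traj.foldl pvStepA (d, none, [])
  if s.2.2 = [] then s.1 else pvAppend s.1 (s.2.1.getD 0) s.2.2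

def preprocess_trajectories (trajectories : List (Int × List (List Int × Int))) : List (Int × List (List (List Int × Int))) :=
  ((PySem.Dict.ofList trajectories).values).foldl pvTrajA [(0, []), (1, []), (2, [])]

-- ===== PORT B =====
-- the outer 'while i < n' loop of Source B: each step extracts the maximal run of the head's
-- key (the inner 'while j < n and key == k' scan is the takeWhile/dropWhile split at j)
def pvRunsB (d : List (Int × List (List (List Int × Int)))) :
    List (List Int × Int) → List (Int × List (List (List Int × Int)))
  | [] => d
  | sa :: rest =>
    let k := pvKey sa
    pvRunsB (pvAppend d k (sa :: rest.takeWhile (fun x => pvKey x = k)))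
      (rest.dropWhile (fun x => pvKey x = k))
  termination_by l => l.length
  decreasing_by
    have := List.length_dropWhile_le (fun x => decide (pvKey x = k)) rest
    simp at *; omega

def preprocess_trajectories_alt (trajectories : List (Int × List (List Int × Int))) : List (Int × List (List (List Int × Int))) :=
  ((PySem.Dict.ofList trajectories).values).foldl pvRunsB [(0, []), (1, []), (2, [])]

-- ===== PRECONDITION & SPEC =====
-- Pre_: exactly the inputs where Python A returns: every state of every trajectory the
-- dict actually holds has length ≥ 2 (else state[-2] is an IndexError) and its
-- second-to-last element is a key of {0,1,2} (else grouped_trajectories[subtask] is a KeyError).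
def Pre_preprocess_trajectories (trajectories : List (Int × List (List Int × Int))) : Prop :=
  ∀ traj ∈ (PySem.Dict.ofList trajectories).values, ∀ sa ∈ traj,
    2 ≤ sa.1.length ∧
      (PySem.List.pyGetD sa.1 (-2) 0 = 0 ∨ PySem.List.pyGetD sa.1 (-2) 0 = 1 ∨
        PySem.List.pyGetD sa.1 (-2) 0 = 2)
instance (trajectories : List (Int × List (List Int × Int))) : Decidable (Pre_preprocess_trajectories trajectories) := by unfold Pre_preprocess_trajectories; infer_instance

def pvWitness_preprocess_trajectories : (List (Int × List (List Int × Int))) :=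
  [(5, [([0, 0], 1), ([1, -1], 2), ([1, 3], 0)]), (7, [])]

def Spec_preprocess_trajectories (trajectories : List (Int × List (List Int × Int))) (out : List (Int × List (List (List Int × Int)))) : Prop := out = preprocess_trajectories_alt trajectories
instance (trajectories : List (Int × List (List Int × Int))) (out : List (Int × List (List (List Int × Int)))) : Decidable (Spec_preprocess_trajectories trajectories out) := by unfold Spec_preprocess_trajectories; infer_instance

-- ===== CLAIM (what is proved, stated in full; the proofs are below) =====
def Claim_equal_preprocess_trajectories : Prop := ∀ (trajectories : List (Int × List (List Int × Int))), Dom_preprocess_trajectories trajectories → Pre_preprocess_trajectories trajectories → Spec_preprocess_trajectories trajectories (preprocess_trajectories trajectories)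

-- ===== LEMMAS AND PROOFS =====

-- invariant: with a nonempty pending segment pre accumulated under key k, finishing A's
-- loop and flushing equals B's scan after closing the current run of k.
theorem pvAux (l : List (List Int × Int)) (d : List (Int × List (List (List Int × Int))))
    (k : Int) (pre : List (List Int × Int)) (hpre : pre ≠ []) :
    (let s := l.foldl pvStepA (d, some k, pre);
      if s.2.2 = [] then s.1 else pvAppend s.1 (s.2.1.getD 0) s.2.2) =
    pvRunsB (pvAppend d k (pre ++ l.takeWhile (fun x => pvKey x = k)))
      (l.dropWhile (fun x => pvKey x = k)) := by
  induction l generalizing d k pre with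
  | nil =>
    simp [pvRunsB, hpre]
  | cons sa rest ih =>
    by_cases hk : pvKey sa = k
    · have hstep : pvStepA (d, some k, pre) sa = (d, some k, pre ++ [sa]) := by
        simp [pvStepA, hk]
      simp only [List.foldl_cons, hstep, List.takeWhile_cons, List.dropWhile_cons, hk]
      rw [ih d k (pre ++ [sa]) (by simp)]
      simp
    · have hstep : pvStepA (d, some k, pre) sa = (pvAppend d k pre, some (pvKey sa), [sa]) := by
        simp [pvStepA, hk, hpre]
      simp only [List.foldl_cons, hstep, List.takeWhile_cons, List.dropWhile_cons, hk]
      rw [ih (pvAppend d k pre) (pvKey sa) [sa] (by simp)]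
      simp [pvRunsB]

-- per trajectory, A's loop equals B's run scan
theorem pvTrajA_eq_pvRunsB (d : List (Int × List (List (List Int × Int))))
    (traj : List (List Int × Int)) : pvTrajA d traj = pvRunsB d traj := by
  cases traj with
  | nil => simp [pvTrajA, pvRunsB]
  | cons sa rest =>
    have hstep : pvStepA (d, none, []) sa = (d, some (pvKey sa), [sa]) := by
      simp [pvStepA]
    unfold pvTrajA
    simp only [List.foldl_cons, hstep]
    rw [pvAux rest d (pvKey sa) [sa] (by simp)]
    simp [pvRunsB]

-- ===== VERDICT (by name: the statement is the Claim_ definition above) =====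
theorem preprocess_trajectories_spec : Claim_equal_preprocess_trajectories := by
  intro trajectories _ _
  unfold Spec_preprocess_trajectories preprocess_trajectories preprocess_trajectories_alt
  have : pvTrajA = pvRunsB := funext fun d => funext fun t => pvTrajA_eq_pvRunsB d t
  rw [this]
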